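-- pv_equiv track=rewrite | github.com/gmr/pgdumplib | pgdumplib/converters.py | unescape_copy_text
-- ===== SOURCE A (Python) =====
-- def unescape_copy_text(field: str) -> str:  # noqa: C901
--     """Unescape PostgreSQL COPY text format escape sequences.
--
--     This function implements the same escape sequence handling as PostgreSQL's
--     CopyReadAttributesText() function in copyfromparse.c.
--
--     Supported escape sequences:
--         \\b - backspace (ASCII 8)
--         \\f - form feed (ASCII 12)
--         \\n - newline (ASCII 10)
--         \\r - carriage return (ASCII 13)
--         \\t - tab (ASCII 9)
--         \\v - vertical tab (ASCII 11)
--         \\NNN - octal byte value (1-3 digits)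
--         \\xNN - hex byte value (1-2 digits)
--         \\X - any other character X literally
--
--     :param field: The escaped field string
--     :return: The unescaped string
--
--     """
--     if '\\' not in field:
--         return field
--
--     result = []
--     i = 0
--     while i < len(field):
--         if field[i] == '\\' and i + 1 < len(field):
--             i += 1
--             c = field[i]
--
--             # Octal escape: \0-\7
--             if '0' <= c <= '7':
--                 val = ord(c) - ord('0')
--                 # Check for second octal digit
--                 if i + 1 < len(field) and '0' <= field[i + 1] <= '7':
--                     i += 1
--                     val = (val << 3) + (ord(field[i]) - ord('0'))
--                     # Check for third octal digit
--                     if i + 1 < len(field) and '0' <= field[i + 1] <= '7':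
--                         i += 1
--                         val = (val << 3) + (ord(field[i]) - ord('0'))
--                 result.append(chr(val & 0o377))
--
--             # Hex escape: \xNN
--             elif c == 'x':
--                 if i + 1 < len(field):
--                     hex_chars = field[i + 1 : i + 3]
--                     hex_val = ''
--                     for hc in hex_chars:
--                         if hc in '0123456789abcdefABCDEF':
--                             hex_val += hc
--                         else:
--                             break
--                     if hex_val:
--                         i += len(hex_val)
--                         result.append(chr(int(hex_val, 16) & 0xFF))
--                     else:
--                         result.append(c)
--                 else:
--                     result.append(c)
--
--             # Single character escapes
--             elif c == 'b':
--                 result.append('\b')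
--             elif c == 'f':
--                 result.append('\f')
--             elif c == 'n':
--                 result.append('\n')
--             elif c == 'r':
--                 result.append('\r')
--             elif c == 't':
--                 result.append('\t')
--             elif c == 'v':
--                 result.append('\v')
--             else:
--                 # Any other backslashed character is literal
--                 result.append(c)
--
--             i += 1
--         else:
--             result.append(field[i])
--             i += 1
--
--     return ''.join(result)
-- ===== SOURCE B (Python) =====
-- import re
--
-- _ESC = re.compile(r'\\([0-7]{1,3}|x[0-9a-fA-F]{0,2}|[bfnrtv]|.)', re.DOTALL)
-- _SIMPLE = {'b': '\b', 'f': '\f', 'n': '\n', 'r': '\r', 't': '\t', 'v': '\v'}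
--
--
-- def _repl(match):
--     g = match.group(1)
--     if '0' <= g[0] <= '7':
--         return chr(int(g, 8) & 0o377)
--     if g[0] == 'x':
--         return chr(int(g[1:], 16) & 0xFF) if len(g) > 1 else 'x'
--     return _SIMPLE.get(g, g)
--
--
-- def unescape_copy_text(field: str) -> str:
--     return _ESC.sub(_repl, field)
-- ===== Notes on version B (the rewrite author's own statement) =====
-- stated objective: idiomatic
-- what changed: Replaced the hand-written index-walking while loop with incremental octal/hex accumulation by a single compiled regex (octal, hex, named-escape and catch-all alternatives) applied via re.sub with a small replacement callback that converts each captured group at once with int(g, 8)/int(g, 16) and a lookup table.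
import Mathlib
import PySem

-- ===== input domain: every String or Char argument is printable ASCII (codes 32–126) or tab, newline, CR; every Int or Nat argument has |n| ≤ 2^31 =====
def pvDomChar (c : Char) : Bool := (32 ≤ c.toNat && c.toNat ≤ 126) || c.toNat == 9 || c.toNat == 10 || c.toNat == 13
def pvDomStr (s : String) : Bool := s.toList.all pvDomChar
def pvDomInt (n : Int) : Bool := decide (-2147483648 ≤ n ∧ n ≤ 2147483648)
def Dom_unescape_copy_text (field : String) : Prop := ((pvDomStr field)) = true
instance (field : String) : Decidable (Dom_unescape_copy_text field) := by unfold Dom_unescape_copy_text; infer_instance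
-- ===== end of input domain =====

-- B replaces A's index-walking while loop by a regex-substitution scanner (one alternation,
-- groups converted at once); objective: idiomatic. Equivalence is proved for all strings.

-- ===== PORT A =====
-- field[i] for an in-range Nat index (every use below is guarded by a bounds check)
def pvAt (s : List Char) (i : Nat) : Char := s.getD i ' '

-- '0' <= c <= '7'
def pvIsOctA (c : Char) : Bool := decide ('0' ≤ c) && decide (c ≤ '7')

-- hc in '0123456789abcdefABCDEF'
def pvIsHexA (c : Char) : Bool := "0123456789abcdefABCDEF".toList.contains c

-- the `for hc in hex_chars: … else: break` loop building hex_val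
def pvHexLoopA : List Char → List Char
  | [] => []
  | c :: r => if pvIsHexA c then c :: pvHexLoopA r else []

def pvHexDig (c : Char) : Nat :=
  if c ≤ '9' then c.toNat - 48 else if 'a' ≤ c then c.toNat - 87 else c.toNat - 55

-- int(hex_val, 16) on a string of hex digits
def pvHexToNat (l : List Char) : Nat := l.foldl (fun a c => a * 16 + pvHexDig c) 0

-- the while-loop of A; i is the index, acc the `result` list
def goA (s : List Char) (acc : List Char) (i : Nat) : List Char :=
  if h : i < s.length then
    if pvAt s i = '\\' ∧ i + 1 < s.length then
      let c := pvAt s (i + 1)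
      if pvIsOctA c then
        let val := c.toNat - 48
        if i + 2 < s.length ∧ pvIsOctA (pvAt s (i + 2)) then
          let val2 := val * 8 + ((pvAt s (i + 2)).toNat - 48)
          if i + 3 < s.length ∧ pvIsOctA (pvAt s (i + 3)) then
            goA s (acc ++ [Char.ofNat ((val2 * 8 + ((pvAt s (i + 3)).toNat - 48)) &&& 255)]) (i + 4)
          else goA s (acc ++ [Char.ofNat (val2 &&& 255)]) (i + 3)
        else goA s (acc ++ [Char.ofNat (val &&& 255)]) (i + 2)
      else if c = 'x' then
        if i + 2 < s.length then
          -- field[i+1:i+3] with nonnegative start: drop/take is exact (Python clamps, so does take)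
          let hexval := pvHexLoopA ((s.drop (i + 2)).take 2)
          if hexval ≠ [] then
            goA s (acc ++ [Char.ofNat (pvHexToNat hexval &&& 255)]) (i + 2 + hexval.length)
          else goA s (acc ++ [c]) (i + 2)
        else goA s (acc ++ [c]) (i + 2)
      else if c = 'b' then goA s (acc ++ ['\x08']) (i + 2)
      else if c = 'f' then goA s (acc ++ ['\x0c']) (i + 2)
      else if c = 'n' then goA s (acc ++ ['\x0a']) (i + 2)
      else if c = 'r' then goA s (acc ++ ['\x0d']) (i + 2)
      else if c = 't' then goA s (acc ++ ['\x09']) (i + 2)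
      else if c = 'v' then goA s (acc ++ ['\x0b']) (i + 2)
      else goA s (acc ++ [c]) (i + 2)
    else goA s (acc ++ [pvAt s i]) (i + 1)
  else acc
termination_by s.length - i
decreasing_by all_goals omega

def unescape_copy_text (field : String) : String :=
  if field.toList.contains '\\' then String.ofList (goA field.toList [] 0) else field

-- ===== PORT B =====
-- character classes of the regex alternatives
def pvIsOctB (c : Char) : Bool := decide ('0' ≤ c ∧ c ≤ '7')
def pvIsHexB (c : Char) : Bool :=
  decide ('0' ≤ c ∧ c ≤ '9') || decide ('a' ≤ c ∧ c ≤ 'f') || decide ('A' ≤ c ∧ c ≤ 'F')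

-- greedy bounded repetition {0,n} of a character class: (matched prefix, remainder)
def pvTakeMax (p : Char → Bool) : Nat → List Char → List Char × List Char
  | 0, l => ([], l)
  | _ + 1, [] => ([], [])
  | n + 1, c :: r =>
    if p c then
      let (t, rest) := pvTakeMax p n r
      (c :: t, rest)
    else ([], c :: r)

theorem pvTakeMax_len (p : Char → Bool) : ∀ (n : Nat) (l : List Char),
    (pvTakeMax p n l).2.length ≤ l.length := by
  intro n
  induction n with
  | zero => intro l; simp [pvTakeMax]
  | succ n ih =>
    intro l
    cases l with
    | nil => simp [pvTakeMax]
    | cons c r =>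
      simp only [pvTakeMax]
      split
      · have := ih r; simp; omega
      · simp

-- int(g, 8) / int(g[1:], 16)
def pvOctNat (g : List Char) : Nat := g.foldl (fun a c => a * 8 + (c.toNat - 48)) 0
def pvHexDigB (c : Char) : Nat :=
  if c ≤ '9' then c.toNat - 48 else if 'a' ≤ c then c.toNat - 87 else c.toNat - 55
def pvHexNat (g : List Char) : Nat := g.foldl (fun a c => a * 16 + pvHexDigB c) 0

-- the _SIMPLE table
def pvSimple : PySem.Dict Char Char :=
  PySem.Dict.mk [('b', '\x08'), ('f', '\x0c'), ('n', '\x0a'), ('r', '\x0d'), ('t', '\x09'), ('v', '\x0b')]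

-- re.sub of r'\\([0-7]{1,3}|x[0-9a-fA-F]{0,2}|[bfnrtv]|.)' (DOTALL) with _repl, ported by
-- hand (exact for this pattern): scan left to right, at each '\\' try the alternatives in
-- order, replace the match by _repl's value and continue after it; a lone trailing '\\'
-- does not match and stays.
def pvSub : List Char → List Char
  | [] => []
  | c :: rest =>
    if c = '\\' then
      match rest with
      | [] => ['\\']
      | d :: rest1 =>
        if pvIsOctB d then
          let m := pvTakeMax pvIsOctB 3 (d :: rest1)
          Char.ofNat (pvOctNat m.1 &&& 255) :: pvSub m.2
        else if d = 'x' then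
          let m := pvTakeMax pvIsHexB 2 rest1
          (if m.1 ≠ [] then Char.ofNat (pvHexNat m.1 &&& 255) else 'x') :: pvSub m.2
        else (pvSimple.getD d d) :: pvSub rest1
    else c :: pvSub rest
termination_by l => l.length
decreasing_by
  · have := pvTakeMax_len pvIsOctB 3 (d :: rest1); simp at this ⊢; omega
  · have := pvTakeMax_len pvIsHexB 2 rest1; simp; omega
  · simp
  · simp

def unescape_copy_text_alt (field : String) : String := String.ofList (pvSub field.toList)

-- ===== PRECONDITION & SPEC =====
def Spec_unescape_copy_text (field : String) (out : String) : Prop := out = unescape_copy_text_alt field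
instance (field : String) (out : String) : Decidable (Spec_unescape_copy_text field out) := by unfold Spec_unescape_copy_text; infer_instance

-- ===== CLAIM (what is proved, stated in full; the proofs are below) =====
def Claim_equal_unescape_copy_text : Prop := ∀ (field : String), Dom_unescape_copy_text field → Spec_unescape_copy_text field (unescape_copy_text field)

-- ===== LEMMAS AND PROOFS =====

theorem pvSub_no_backslash : ∀ (l : List Char), l.contains '\\' = false → pvSub l = l := by
  intro l
  induction l with
  | nil => intro _; rw [pvSub.eq_def]
  | cons c r ih =>
    intro h
    simp at h
    rw [pvSub.eq_def]
    simp [ih (by simpa using h.2)]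
    intro hc; exact absurd hc.symm h.1

set_option maxRecDepth 8000

theorem oct_AB : pvIsOctA = pvIsOctB := by
  funext c; simp [pvIsOctA, pvIsOctB]

theorem hex_AB : pvIsHexA = pvIsHexB := by
  funext c
  rw [Bool.eq_iff_iff]
  simp [pvIsHexA, pvIsHexB, Char.le_def, Char.ext_iff, UInt32.le_iff_toNat_le, UInt32.ext_iff]
  omega

theorem drop_at (s : List Char) (i : Nat) (h : i < s.length) :
    s.drop i = pvAt s i :: s.drop (i + 1) := by
  rw [List.drop_eq_getElem_cons h, pvAt, List.getD_eq_getElem s ' ' h]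

theorem drop_at' (s : List Char) (i j : Nat) (h : i < s.length) (hj : j = i + 1) :
    s.drop i = pvAt s i :: s.drop j := by subst hj; exact drop_at s i h

theorem hexTake : ∀ (n : Nat) (l : List Char),
    pvTakeMax pvIsHexB n l = (pvHexLoopA (l.take n), l.drop (pvHexLoopA (l.take n)).length) := by
  intro n
  induction n with
  | zero => intro l; simp [pvTakeMax, pvHexLoopA]
  | succ n ih =>
    intro l
    cases l with
    | nil => simp [pvTakeMax, pvHexLoopA]
    | cons c r =>
      by_cases hc : pvIsHexA c
      · have hc' : pvIsHexB c = true := hex_AB ▸ hc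
        simp [pvTakeMax, pvHexLoopA, hc, hc', ih r]
      · have hc' : pvIsHexB c = false := by rw [← hex_AB]; simpa using hc
        simp [pvTakeMax, pvHexLoopA, hc, hc']

theorem pvSub_nil : pvSub [] = [] := by rw [pvSub.eq_def]

theorem pvSub_cons_ne (c : Char) (l : List Char) (hc : c ≠ '\\') :
    pvSub (c :: l) = c :: pvSub l := by
  rw [pvSub.eq_def]; simp [hc]

theorem pvSub_bs_nil : pvSub ['\\'] = ['\\'] := by rw [pvSub.eq_def]; simp

theorem pvSub_oct (d : Char) (l : List Char) (hd : pvIsOctB d = true) :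
    pvSub ('\\' :: d :: l) =
      Char.ofNat (pvOctNat (pvTakeMax pvIsOctB 3 (d :: l)).1 &&& 255) ::
        pvSub (pvTakeMax pvIsOctB 3 (d :: l)).2 := by
  rw [pvSub.eq_def]; simp [hd]

theorem pvSub_hex (l : List Char) :
    pvSub ('\\' :: 'x' :: l) =
      (if (pvTakeMax pvIsHexB 2 l).1 = [] then 'x'
       else Char.ofNat (pvHexNat (pvTakeMax pvIsHexB 2 l).1 &&& 255)) ::
        pvSub (pvTakeMax pvIsHexB 2 l).2 := by
  rw [pvSub.eq_def]
  have : pvIsOctB 'x' = false := by decide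
  simp [this]

theorem pvSub_simple (d : Char) (l : List Char) (hd : pvIsOctB d = false) (hx : d ≠ 'x') :
    pvSub ('\\' :: d :: l) = pvSimple.getD d d :: pvSub l := by
  rw [pvSub.eq_def]; simp [hd, hx]

theorem hexNat_eq : pvHexNat = pvHexToNat := by
  funext l; simp [pvHexNat, pvHexToNat, pvHexDig, pvHexDigB]

theorem pvHexLoopA_len (l : List Char) : (pvHexLoopA l).length ≤ l.length := by
  induction l with
  | nil => simp [pvHexLoopA]
  | cons a r ihl =>
    rw [pvHexLoopA]
    split
    · simp; omega
    · simp

theorem tblSimple (c : Char) :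
    (if c = 'b' then '\x08' else if c = 'f' then '\x0c' else if c = 'n' then '\x0a'
     else if c = 'r' then '\x0d' else if c = 't' then '\x09' else if c = 'v' then '\x0b'
     else c) = pvSimple.getD c c := by
  by_cases hb : c = 'b'; · subst hb; decide
  by_cases hf : c = 'f'; · subst hf; decide
  by_cases hn' : c = 'n'; · subst hn'; decide
  by_cases hr : c = 'r'; · subst hr; decide
  by_cases ht : c = 't'; · subst ht; decide
  by_cases hv : c = 'v'; · subst hv; decide
  simp [hb, hf, hn', hr, ht, hv, pvSimple, PySem.Dict.getD, PySem.Dict.get?,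
    Ne.symm hb, Ne.symm hf, Ne.symm hn', Ne.symm hr, Ne.symm ht, Ne.symm hv]

theorem goA_eq_pvSub (s : List Char) : ∀ (n i : Nat) (acc : List Char),
    s.length - i ≤ n → goA s acc i = acc ++ pvSub (s.drop i) := by
  intro n
  induction n with
  | zero =>
    intro i acc h
    rw [goA, dif_neg (by omega), List.drop_eq_nil_of_le (by omega), pvSub_nil]
    simp
  | succ n ih =>
    intro i acc hn
    by_cases hi : i < s.length
    · have hdi := drop_at s i hi
      by_cases hb : pvAt s i = '\\' ∧ i + 1 < s.length
      · obtain ⟨hbs, h1⟩ := hb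
        have hdi1 := drop_at' s (i + 1) (i + 2) h1 (by omega)
        rw [goA, dif_pos hi, if_pos ⟨hbs, h1⟩, hdi, hbs, hdi1]
        by_cases hoct : pvIsOctA (pvAt s (i + 1))
        · -- octal escape
          have hoct' : pvIsOctB (pvAt s (i + 1)) = true := oct_AB ▸ hoct
          rw [if_pos hoct, pvSub_oct _ _ hoct']
          by_cases h2 : i + 2 < s.length ∧ pvIsOctA (pvAt s (i + 2)) = true
          · obtain ⟨h2l, h2o⟩ := h2
            have hdi2 := drop_at' s (i + 2) (i + 3) h2l (by omega)
            have h2o' : pvIsOctB (pvAt s (i + 2)) = true := oct_AB ▸ h2o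
            rw [if_pos ⟨h2l, h2o⟩, hdi2]
            by_cases h3 : i + 3 < s.length ∧ pvIsOctA (pvAt s (i + 3)) = true
            · obtain ⟨h3l, h3o⟩ := h3
              have hdi3 := drop_at' s (i + 3) (i + 4) h3l (by omega)
              have h3o' : pvIsOctB (pvAt s (i + 3)) = true := oct_AB ▸ h3o
              rw [if_pos ⟨h3l, h3o⟩, hdi3, ih (i + 4) _ (by omega)]
              simp [pvTakeMax, hoct', h2o', h3o', pvOctNat]
            · rw [if_neg h3, ih (i + 3) _ (by omega)]
              rcases Nat.lt_or_ge (i + 3) s.length with h3l | h3l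
              · have hdi3 := drop_at' s (i + 3) (i + 4) h3l (by omega)
                have h3o : pvIsOctB (pvAt s (i + 3)) = false := by
                  rw [← oct_AB]; simpa [h3l] using h3
                rw [hdi3]
                simp [pvTakeMax, hoct', h2o', h3o, pvOctNat, ← hdi3]
              · have hdi3 : s.drop (i + 3) = [] := List.drop_eq_nil_of_le (by omega)
                rw [hdi3]
                simp [pvTakeMax, hoct', h2o', pvOctNat]
          · rw [if_neg h2, ih (i + 2) _ (by omega)]
            rcases Nat.lt_or_ge (i + 2) s.length with h2l | h2l
            · have hdi2 := drop_at' s (i + 2) (i + 3) h2l (by omega)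
              have h2o : pvIsOctB (pvAt s (i + 2)) = false := by
                rw [← oct_AB]; simpa [h2l] using h2
              rw [hdi2]
              simp [pvTakeMax, hoct', h2o, pvOctNat, ← hdi2]
            · have hdi2 : s.drop (i + 2) = [] := List.drop_eq_nil_of_le (by omega)
              rw [hdi2]
              simp [pvTakeMax, hoct', pvOctNat]
        · have hoct' : pvIsOctB (pvAt s (i + 1)) = false := by
            rw [← oct_AB]; simpa using hoct
          rw [if_neg hoct]
          by_cases hx : pvAt s (i + 1) = 'x'
          · rw [if_pos hx, hx, pvSub_hex, hexTake]
            by_cases h2 : i + 2 < s.length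
            · rw [if_pos h2]
              by_cases hne : pvHexLoopA ((s.drop (i + 2)).take 2) ≠ []
              · rw [if_pos hne, ih _ _ (by
                  have h0 := List.length_take_le 2 (s.drop (i + 2))
                  have h2' := pvHexLoopA_len ((s.drop (i + 2)).take 2)
                  omega)]
                have hdd : (s.drop (i + 2)).drop (pvHexLoopA ((s.drop (i + 2)).take 2)).length
                    = s.drop (i + 2 + (pvHexLoopA ((s.drop (i + 2)).take 2)).length) := by
                  rw [List.drop_drop]
                simp [hexNat_eq, hne, hdd]
              · rw [if_neg hne, ih (i + 2) _ (by omega)]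
                simp at hne
                simp [hne]
            · rw [if_neg h2, ih (i + 2) _ (by omega)]
              have hdi2 : s.drop (i + 2) = [] := List.drop_eq_nil_of_le (by omega)
              rw [hdi2]
              simp [pvHexLoopA]
          · -- single-character escapes / literal
            rw [if_neg hx, pvSub_simple _ _ hoct' hx, ← tblSimple]
            split_ifs with e1 e2 e3 e4 e5 e6 <;> rw [ih (i + 2) _ (by omega)] <;> simp
      · rw [goA, dif_pos hi, if_neg hb, ih (i + 1) _ (by omega), hdi]
        by_cases hbs : pvAt s i = '\\'
        · have h1 : ¬ i + 1 < s.length := fun h => hb ⟨hbs, h⟩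
          have hnil : s.drop (i + 1) = [] := List.drop_eq_nil_of_le (by omega)
          rw [hbs, hnil, pvSub_bs_nil, pvSub_nil]
          simp
        · rw [pvSub_cons_ne _ _ hbs]
          simp
    · rw [goA, dif_neg hi, List.drop_eq_nil_of_le (by omega), pvSub_nil]
      simp

-- ===== VERDICT (by name: the statement is the Claim_ definition above) =====
theorem unescape_copy_text_spec : Claim_equal_unescape_copy_text := by
  intro field _
  unfold Spec_unescape_copy_text unescape_copy_text unescape_copy_text_alt
  by_cases h : field.toList.contains '\\'
  · simp only [h, if_true]
    rw [goA_eq_pvSub field.toList field.toList.length 0 [] (by omega)]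
    simp
  · simp only [h]
    rw [pvSub_no_backslash _ (by simpa using h)]
    exact String.ofList_toList.symm
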